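-- pv_equiv track=rewrite | github.com/rajeshvermadav/Class-XI-IP | recursion.py | contracting
-- ===== SOURCE A (Python) =====
-- def contracting(l):
--    x=0
--    old_diff=abs(l[x]-l[x+1])
--    for i in range(1,len(l)-1):
--        diff=abs(l[i]-l[i+1])
--        if diff<old_diff:
--            old_diff=diff
--        else:
--            return False
--    return True
-- ===== SOURCE B (Python) =====
-- def contracting(l):
--     diffs = [abs(a - b) for a, b in zip(l, l[1:])]
--     return diffs == sorted(diffs, reverse=True) and len(set(diffs)) == len(diffs)
-- ===== Notes on version B (the rewrite author's own statement) =====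
-- stated objective: alternative
-- what changed: A's fused compute-and-compare index loop carrying old_diff is replaced by a sort-based characterization: build the list of consecutive absolute differences, then check it equals its own reverse-sorted version and contains no duplicates (strictly decreasing iff sorted descending and all distinct).
-- outside the precondition, e.g. on contracting([]): A raises IndexError, B returns True; on contracting([5]): A raises IndexError, B returns True
import Mathlib
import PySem

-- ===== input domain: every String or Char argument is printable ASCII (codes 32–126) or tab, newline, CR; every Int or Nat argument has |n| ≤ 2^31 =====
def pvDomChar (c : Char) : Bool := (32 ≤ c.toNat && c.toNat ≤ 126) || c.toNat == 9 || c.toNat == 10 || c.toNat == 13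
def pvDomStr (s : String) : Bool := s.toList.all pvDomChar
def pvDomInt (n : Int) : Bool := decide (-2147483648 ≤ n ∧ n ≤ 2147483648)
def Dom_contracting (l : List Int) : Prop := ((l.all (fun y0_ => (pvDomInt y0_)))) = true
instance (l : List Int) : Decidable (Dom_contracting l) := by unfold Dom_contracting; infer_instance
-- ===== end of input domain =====

-- B replaces A's fused compute-and-compare loop by a sort-based check: the difference list is
-- strictly decreasing iff it equals its reverse-sorted version and has no duplicates (objective: alternative).

-- ===== PORT A =====
-- the for-loop over range(1, len(l)-1); pyGetD is exact here: under Pre_ every index is in range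
def contractingLoop (l : List Int) : Int → List Int → Bool
  | _, [] => true
  | oldDiff, i :: rest =>
    let diff := |PySem.List.pyGetD l i 0 - PySem.List.pyGetD l (i + 1) 0|
    if diff < oldDiff then contractingLoop l diff rest else false

def contracting (l : List Int) : Bool :=
  let x : Int := 0
  let oldDiff := |PySem.List.pyGetD l x 0 - PySem.List.pyGetD l (x + 1) 0|
  contractingLoop l oldDiff (PySem.List.pyRange 1 ((l.length : Int) - 1) 1)

-- ===== PORT B =====
def contracting_alt (l : List Int) : Bool :=
  let diffs := (l.zip l.tail).map (fun p => |p.1 - p.2|)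
  decide (diffs = PySem.List.sorted diffs (fun x => x) true) &&
    decide (PySem.Set.len (PySem.Set.ofList diffs) = (diffs.length : Int))

-- ===== PRECONDITION & SPEC =====
-- A evaluates l[0] and l[1] before the loop, so it raises IndexError on lists of length < 2.
def Pre_contracting (l : List Int) : Prop := 2 ≤ l.length
instance (l : List Int) : Decidable (Pre_contracting l) := by unfold Pre_contracting; infer_instance
def pvWitness_contracting : List Int := ([9, 4, 1])

def Spec_contracting (l : List Int) (out : Bool) : Prop := out = contracting_alt l
instance (l : List Int) (out : Bool) : Decidable (Spec_contracting l out) := by unfold Spec_contracting; infer_instance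

-- ===== CLAIM (what is proved, stated in full; the proofs are below) =====
def Claim_equal_contracting : Prop := ∀ (l : List Int), Dom_contracting l → Pre_contracting l → Spec_contracting l (contracting l)

-- ===== LEMMAS AND PROOFS =====

-- the diffs list B builds
def pvDiffs (l : List Int) : List Int := (l.zip l.tail).map (fun p => |p.1 - p.2|)

-- A's loop, abstracted: carries the previous difference
def pvChain : Int → List Int → Bool
  | _, [] => true
  | d, x :: xs => if x < d then pvChain x xs else false

theorem pvDiffs_length (l : List Int) : (pvDiffs l).length = l.length - 1 := by
  simp [pvDiffs, List.length_zip, List.length_tail]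

theorem pvDiffs_getElem (l : List Int) (i : Nat) (h : i < (pvDiffs l).length) :
    (pvDiffs l)[i] = |l[i]'(by simp [pvDiffs_length] at h; omega) -
      l[i + 1]'(by simp [pvDiffs_length] at h; omega)| := by
  simp [pvDiffs, List.getElem_zip, List.getElem_tail]

-- pvChain d ds is the strict descending chain check on d :: ds
theorem pvChain_eq_chain (d : Int) (ds : List Int) :
    pvChain d ds = decide (List.IsChain (fun a b => a > b) (d :: ds)) := by
  induction ds generalizing d with
  | nil => simp [pvChain]
  | cons x xs ih =>
    simp only [pvChain, ih x, List.isChain_cons_cons]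
    by_cases h : x < d <;> simp [h]

-- A's loop over range(a, len(l)-1) is pvChain on the dropped diffs list
theorem contractingLoop_eq_pvChain (l : List Int) (a : Nat) (d : Int) :
    contractingLoop l d (PySem.List.pyRange (a : Int) ((l.length : Int) - 1) 1) =
      pvChain d ((pvDiffs l).drop a) := by
  by_cases hlen : a < l.length - 1
  · have h1 : (a : Int) < (l.length : Int) - 1 := by omega
    rw [PySem.List.pyRange_one_cons h1]
    have hd : a < (pvDiffs l).length := by rw [pvDiffs_length]; omega
    have hdrop : (pvDiffs l).drop a = (pvDiffs l)[a] :: (pvDiffs l).drop (a + 1) :=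
      (List.drop_eq_getElem_cons hd)
    rw [hdrop]
    show (if |PySem.List.pyGetD l (a : Int) 0 - PySem.List.pyGetD l ((a : Int) + 1) 0| < d then
        contractingLoop l _ (PySem.List.pyRange ((a : Int) + 1) ((l.length : Int) - 1) 1) else false) = _
    have hg1 : PySem.List.pyGetD l (a : Int) 0 = l[a]'(by omega) := by
      rw [PySem.List.pyGetD_eq_getElem l 0 (by omega) (by exact_mod_cast by omega)]; simp
    have hg2 : PySem.List.pyGetD l ((a : Int) + 1) 0 = l[a + 1]'(by omega) := by
      rw [show ((a : Int) + 1) = ((a + 1 : Nat) : Int) by push_cast; ring,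
        PySem.List.pyGetD_eq_getElem l 0 (by omega) (by exact_mod_cast by omega)]
      simp
    have hdiff : |PySem.List.pyGetD l (a : Int) 0 - PySem.List.pyGetD l ((a : Int) + 1) 0| =
        (pvDiffs l)[a] := by rw [hg1, hg2, pvDiffs_getElem l a hd]
    rw [hdiff]
    have hrec := contractingLoop_eq_pvChain l (a + 1) ((pvDiffs l)[a])
    rw [show ((a : Int) + 1) = ((a + 1 : Nat) : Int) by push_cast; ring]
    by_cases hc : (pvDiffs l)[a] < d
    · simp only [hc, if_pos, pvChain]
      exact hrec
    · simp [pvChain, hc]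
  · have h1 : PySem.List.pyRange (a : Int) ((l.length : Int) - 1) 1 = [] := by
      simp [PySem.List.pyRange]; omega
    have h2 : (pvDiffs l).drop a = [] := by
      rw [List.drop_eq_nil_iff, pvDiffs_length]; omega
    rw [h1, h2]; rfl
termination_by l.length - a

-- set(xs) is a sublist of xs (first occurrences, in order)
theorem pvOfList_sublist (xs : List Int) : (PySem.Set.ofList xs).Sublist xs := by
  induction xs using List.reverseRecOn with
  | nil => simp [PySem.Set.ofList_nil]
  | append_singleton ys y ih =>
    rw [PySem.Set.ofList_append_singleton, PySem.Set.add_eq_ite]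
    split_ifs with h
    · exact ih.trans (List.sublist_append_left ys [y])
    · exact ih.append (List.Sublist.refl [y])

-- len(set(xs)) == len(xs) exactly when xs has no duplicates
theorem pvLen_ofList_iff (xs : List Int) :
    (PySem.Set.len (PySem.Set.ofList xs) = (xs.length : Int)) ↔ xs.Nodup := by
  constructor
  · intro h
    have hlen : (PySem.Set.ofList xs).length = xs.length := by
      simp only [PySem.Set.len] at h; exact_mod_cast h
    have := (pvOfList_sublist xs).eq_of_length hlen
    rw [← this]; exact PySem.Set.nodup_ofList xs
  · intro h
    rw [PySem.Set.ofList_eq_self_of_nodup xs h]; simp [PySem.Set.len]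

-- B's two checks together say: strictly decreasing
theorem pvAlt_iff (xs : List Int) :
    (xs = PySem.List.sorted xs (fun x => x) true ∧
      PySem.Set.len (PySem.Set.ofList xs) = (xs.length : Int)) ↔
      xs.Pairwise (fun a b => a > b) := by
  rw [pvLen_ofList_iff]
  constructor
  · rintro ⟨hs, hn⟩
    have hp : xs.Pairwise (fun a b => b ≤ a) := by
      have := PySem.List.sorted_pairwise_rev xs (fun x => x)
      rw [← hs] at this; exact this
    exact (hp.and hn).imp (fun h => lt_of_le_of_ne h.1 (Ne.symm h.2))
  · intro hp
    constructor
    · exact (PySem.List.sorted_rev_eq_of_perm_of_pairwise_gt xs xs (fun x => x)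
        (List.Perm.refl xs) (hp.imp (fun h => h))).symm
    · exact hp.imp (fun h => ne_of_gt h)

theorem contracting_alt_eq (l : List Int) :
    contracting_alt l = decide ((pvDiffs l).Pairwise (fun a b => a > b)) := by
  rw [show contracting_alt l = (decide (pvDiffs l = PySem.List.sorted (pvDiffs l) (fun x => x) true) &&
      decide (PySem.Set.len (PySem.Set.ofList (pvDiffs l)) = ((pvDiffs l).length : Int))) from rfl,
    ← Bool.decide_and, decide_eq_decide]
  exact pvAlt_iff (pvDiffs l)

-- ===== VERDICT (by name: the statement is the Claim_ definition above) =====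
theorem contracting_spec : Claim_equal_contracting := by
  intro l _hdom hpre
  unfold Pre_contracting at hpre
  unfold Spec_contracting contracting
  have hd0 : 0 < (pvDiffs l).length := by rw [pvDiffs_length]; omega
  have hg1 : PySem.List.pyGetD l (0 : Int) 0 = l[0]'(by omega) := by
    rw [PySem.List.pyGetD_eq_getElem l 0 (by omega) (by exact_mod_cast show 0 < l.length by omega)]
    simp
  have hg2 : PySem.List.pyGetD l ((0 : Int) + 1) 0 = l[1]'(by omega) := by
    rw [show ((0 : Int) + 1) = ((1 : Nat) : Int) by norm_num,
      PySem.List.pyGetD_eq_getElem l 0 (by omega) (by exact_mod_cast show 1 < l.length by omega)]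
    simp
  simp only [hg1, hg2]
  have hdiff : |l[0]'(by omega) - l[1]'(by omega)| = (pvDiffs l)[0] := by
    rw [pvDiffs_getElem l 0 hd0]
  rw [hdiff]
  have h := contractingLoop_eq_pvChain l 1 ((pvDiffs l)[0])
  simp only [Nat.cast_one] at h
  rw [h, pvChain_eq_chain, contracting_alt_eq,
    ← List.drop_eq_getElem_cons hd0, List.drop_zero, decide_eq_decide]
  exact List.isChain_iff_pairwise
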